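-- pv_equiv track=rewrite | github.com/thomkuo/CS313E | Test1/InterestingDrink.py | find_purchase_options
-- ===== SOURCE A (Python) =====
-- def binary_search (a, x):
--     lo = 0
--     hi = len(a) - 1
--     index = -1
--     while (lo <= hi):
--         mid = (lo + hi) // 2
--         if (x >= a[mid]):
--             lo = mid + 1
--         else:
--             index = mid
--             hi = mid - 1
--     return index
--
-- def find_purchase_options(prices, money):
--     insert_prices = sorted(prices)
--     output = []
--     for i in money:
--         insert = binary_search(insert_prices, i)
--         if insert == -1:
--             output.append(len(insert_prices))
--         else:
--             output.append(insert)
--     return(output)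
-- ===== SOURCE B (Python) =====
-- def find_purchase_options(prices, money):
--     sp = sorted(prices)
--     order = sorted(range(len(money)), key=lambda i: money[i])
--     out = [0] * len(money)
--     ptr = 0
--     for i in order:
--         q = money[i]
--         while ptr < len(sp) and sp[ptr] <= q:
--             ptr += 1
--         out[i] = ptr
--     return out
-- ===== Notes on version B (the rewrite author's own statement) =====
-- stated objective: faster
-- what changed: Replaces A's per-query hand-written binary search over the sorted prices with an offline two-pointer sweep: queries are sorted (with their original indices), one pointer advances monotonically through the sorted prices across all queries, and each count is scattered back into the output at the query's original index.
import Mathlib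
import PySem

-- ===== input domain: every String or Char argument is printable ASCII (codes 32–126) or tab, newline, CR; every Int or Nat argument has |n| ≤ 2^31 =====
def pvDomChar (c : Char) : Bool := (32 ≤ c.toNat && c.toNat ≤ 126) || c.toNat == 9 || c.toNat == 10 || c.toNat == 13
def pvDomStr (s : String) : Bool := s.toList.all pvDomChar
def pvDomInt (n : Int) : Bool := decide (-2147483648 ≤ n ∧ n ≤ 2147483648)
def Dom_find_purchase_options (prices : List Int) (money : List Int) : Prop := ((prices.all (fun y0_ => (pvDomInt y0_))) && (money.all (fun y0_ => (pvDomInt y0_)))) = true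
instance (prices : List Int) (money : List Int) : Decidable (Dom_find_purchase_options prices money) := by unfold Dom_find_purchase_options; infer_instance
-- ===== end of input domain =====

-- B replaces A's per-query binary search with an offline two-pointer sweep: queries are
-- processed in sorted order and the counts are scattered back by original index
-- (objective: faster by a constant factor, measured).

-- ===== PORT A =====
-- the while-loop of binary_search; state (lo, hi, index), terminates because hi - lo shrinks
def pvBsLoop (a : List Int) (x : Int) (lo hi index : Int) : Int :=
  if _h : lo ≤ hi then
    let mid := PySem.Int.floordiv (lo + hi) 2
    -- a[mid]: on every call reachable from binary_search 0 ≤ lo ≤ mid ≤ hi < len a,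
    -- so Python's a[mid] never raises and pyGetD is exact there
    if PySem.List.pyGetD a mid 0 ≤ x then
      pvBsLoop a x (mid + 1) hi index
    else
      pvBsLoop a x lo (mid - 1) mid
  else index
termination_by (hi + 1 - lo).toNat
decreasing_by
  · have := PySem.Int.floordiv_two_mid_bounds _h; omega
  · have := PySem.Int.floordiv_two_mid_bounds _h; omega

def binary_search (a : List Int) (x : Int) : Int :=
  pvBsLoop a x 0 ((a.length : Int) - 1) (-1)

def find_purchase_options (prices : List Int) (money : List Int) : List Int :=
  let insert_prices := PySem.List.sorted prices (fun x => x) false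
  money.foldl (fun output i =>
    let insert := binary_search insert_prices i
    if insert = -1 then output ++ [(insert_prices.length : Int)]
    else output ++ [insert]) []

-- ===== PORT B =====
-- the inner 'while ptr < len(sp) and sp[ptr] <= q' of Source B
def pvAdv (sp : List Int) (q : Int) (ptr : Nat) : Nat :=
  if h : ptr < sp.length then
    if sp[ptr] ≤ q then pvAdv sp q (ptr + 1) else ptr
  else ptr
termination_by sp.length - ptr

-- the 'for i in order' loop of Source B; money[i] is exact as pyGetD because every i ∈ order
-- is an index of money, and out[i] = ptr is pySetD
def pvBLoop (sp : List Int) (money : List Int) : List Int → Nat → List Int → List Int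
  | [], _, out => out
  | i :: rest, ptr, out =>
      let q := PySem.List.pyGetD money i 0
      let p := pvAdv sp q ptr
      pvBLoop sp money rest p (PySem.List.pySetD out i (p : Int))

def find_purchase_options_alt (prices : List Int) (money : List Int) : List Int :=
  let sp := PySem.List.sorted prices (fun x => x) false
  let order := PySem.List.sorted (PySem.List.pyRange 0 (money.length : Int) 1)
      (fun i => PySem.List.pyGetD money i 0) false
  pvBLoop sp money order 0 (List.replicate money.length 0)

-- ===== PRECONDITION & SPEC =====
def Spec_find_purchase_options (prices : List Int) (money : List Int) (out : List Int) : Prop := out = find_purchase_options_alt prices money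
instance (prices : List Int) (money : List Int) (out : List Int) : Decidable (Spec_find_purchase_options prices money out) := by unfold Spec_find_purchase_options; infer_instance

-- ===== CLAIM (what is proved, stated in full; the proofs are below) =====
def Claim_equal_find_purchase_options : Prop := ∀ (prices : List Int) (money : List Int), Dom_find_purchase_options prices money → Spec_find_purchase_options prices money (find_purchase_options prices money)

-- ===== LEMMAS AND PROOFS =====

-- k is "the number of elements of sa that are ≤ x" stated positionally; on any list this
-- characterisation is unique, and both programs' per-query answers satisfy it (for sorted sa)
def pvChar (sa : List Int) (x : Int) (k : Nat) : Prop :=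
  k ≤ sa.length ∧
  (∀ j, (hj : j < sa.length) → j < k → sa[j] ≤ x) ∧
  (∀ j, (hj : j < sa.length) → k ≤ j → x < sa[j])

theorem pvChar_unique {sa : List Int} {x : Int} {k1 k2 : Nat}
    (h1 : pvChar sa x k1) (h2 : pvChar sa x k2) : k1 = k2 := by
  obtain ⟨hl1, ha1, hb1⟩ := h1
  obtain ⟨hl2, ha2, hb2⟩ := h2
  by_contra hne
  rcases Nat.lt_or_ge k1 k2 with h | h
  · have hk : k1 < sa.length := lt_of_lt_of_le h hl2
    have := hb1 k1 hk le_rfl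
    have := ha2 k1 hk h
    omega
  · have h' : k2 < k1 := by omega
    have hk : k2 < sa.length := lt_of_lt_of_le h' hl1
    have := hb2 k2 hk le_rfl
    have := ha1 k2 hk h'
    omega

theorem pvBsLoop_char (sa : List Int) (x : Int) (hs : sa.Pairwise (· ≤ ·)) :
    ∀ (lo hi index : Int),
      0 ≤ lo → hi < (sa.length : Int) → lo ≤ hi + 1 →
      (∀ j, (hj : j < sa.length) → (j : Int) < lo → sa[j] ≤ x) →
      (∀ j, (hj : j < sa.length) → hi < (j : Int) → x < sa[j]) →
      ((index = -1 ∧ hi = (sa.length : Int) - 1) ∨ index = hi + 1) →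
      ∃ k : Nat, pvChar sa x k ∧
        (if pvBsLoop sa x lo hi index = -1 then (sa.length : Int)
         else pvBsLoop sa x lo hi index) = (k : Int) := by
  have hmono := List.pairwise_iff_getElem.mp hs
  intro lo hi index
  induction lo, hi, index using pvBsLoop.induct sa x with
  | case1 lo hi index hle mid hbr ih =>
    intro hlo hhi hlohi Hlo Hhi Hidx
    have hmideq : mid = PySem.Int.floordiv (lo + hi) 2 := rfl
    have hmid := PySem.Int.floordiv_two_mid_bounds hle
    rw [← hmideq] at hmid
    have hmlt : mid < (sa.length : Int) := by omega
    have hm0 : 0 ≤ mid := by omega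
    have hget : PySem.List.pyGetD sa mid 0 = sa[mid.toNat] :=
      PySem.List.pyGetD_eq_getElem sa 0 hm0 hmlt
    have hstep : pvBsLoop sa x lo hi index = pvBsLoop sa x (mid + 1) hi index := by
      conv_lhs => rw [pvBsLoop]
      simp only [dif_pos hle]
      exact if_pos hbr
    rw [hstep]
    apply ih (by omega) hhi (by omega)
    · intro j hj hjlt
      rcases Nat.lt_or_ge j mid.toNat with hc | hc
      · rcases Int.lt_or_le (j : Int) lo with hc2 | hc2
        · exact Hlo j hj hc2
        · have h1 : sa[j] ≤ sa[mid.toNat] := hmono j mid.toNat hj (by omega) hc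
          have h2 : sa[mid.toNat] ≤ x := by rw [← hget]; exact hbr
          omega
      · have hje : j = mid.toNat := by omega
        subst hje
        rw [← hget]; exact hbr
    · exact Hhi
    · exact Hidx
  | case2 lo hi index hle mid hbr ih =>
    intro hlo hhi hlohi Hlo Hhi Hidx
    have hmideq : mid = PySem.Int.floordiv (lo + hi) 2 := rfl
    have hmid := PySem.Int.floordiv_two_mid_bounds hle
    rw [← hmideq] at hmid
    have hmlt : mid < (sa.length : Int) := by omega
    have hm0 : 0 ≤ mid := by omega
    have hget : PySem.List.pyGetD sa mid 0 = sa[mid.toNat] :=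
      PySem.List.pyGetD_eq_getElem sa 0 hm0 hmlt
    have hstep : pvBsLoop sa x lo hi index = pvBsLoop sa x lo (mid - 1) mid := by
      conv_lhs => rw [pvBsLoop]
      simp only [dif_pos hle]
      exact if_neg hbr
    rw [hstep]
    apply ih hlo (by omega) (by omega) Hlo
    · intro j hj hjgt
      have h1 : x < sa[mid.toNat] := by
        rw [← hget]; omega
      rcases Nat.lt_or_ge mid.toNat j with hc | hc
      · exact lt_of_lt_of_le h1 (hmono mid.toNat j (by omega) hj hc)
      · have hje : j = mid.toNat := by omega
        subst hje; exact h1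
    · right; omega
  | case3 lo hi index hle =>
    intro hlo hhi hlohi Hlo Hhi Hidx
    have hstep : pvBsLoop sa x lo hi index = index := by
      rw [pvBsLoop]; exact dif_neg hle
    rw [hstep]
    rcases Hidx with ⟨hidx, hhieq⟩ | hidx
    · refine ⟨sa.length, ⟨le_rfl, ?_, ?_⟩, ?_⟩
      · intro j hj _; exact Hlo j hj (by omega)
      · intro j hj hjk; omega
      · rw [if_pos hidx]
    · refine ⟨index.toNat, ⟨by omega, ?_, ?_⟩, ?_⟩
      · intro j hj hjk; exact Hlo j hj (by omega)
      · intro j hj hjk; exact Hhi j hj (by omega)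
      · rw [if_neg (by omega)]; omega

theorem pvAdv_char (sa : List Int) (q : Int) (hs : sa.Pairwise (· ≤ ·)) :
    ∀ ptr : Nat, ptr ≤ sa.length →
      (∀ j, (hj : j < sa.length) → j < ptr → sa[j] ≤ q) →
      pvChar sa q (pvAdv sa q ptr) := by
  have hmono := List.pairwise_iff_getElem.mp hs
  intro ptr
  induction ptr using pvAdv.induct sa q with
  | case1 ptr hlt hle ih =>
    intro _ hp
    rw [pvAdv, dif_pos hlt, if_pos hle]
    apply ih (by omega)
    intro j hj hjlt
    rcases Nat.lt_or_ge j ptr with hc | hc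
    · exact hp j hj hc
    · have : j = ptr := by omega
      subst this; exact hle
  | case2 ptr hlt hle =>
    intro hple hp
    rw [pvAdv, dif_pos hlt, if_neg hle]
    refine ⟨hple, hp, ?_⟩
    intro j hj hjk
    have h1 : q < sa[ptr] := by omega
    rcases Nat.lt_or_ge ptr j with hc | hc
    · exact lt_of_lt_of_le h1 (hmono ptr j hlt hj hc)
    · have : j = ptr := by omega
      subst this; exact h1
  | case3 ptr hlt =>
    intro hple hp
    rw [pvAdv, dif_neg hlt]
    exact ⟨hple, hp, fun j hj _ => absurd hj (by omega)⟩

theorem pvBLoop_spec (sa money : List Int) (hs : sa.Pairwise (· ≤ ·)) :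
    ∀ (order : List Int) (ptr : Nat) (out : List Int),
      out.length = money.length →
      ptr ≤ sa.length →
      (∀ i ∈ order, 0 ≤ i ∧ i < (money.length : Int)) →
      order.Pairwise (fun a b => PySem.List.pyGetD money a 0 ≤ PySem.List.pyGetD money b 0) →
      (∀ i ∈ order, ∀ j, (hj : j < sa.length) → j < ptr → sa[j] ≤ PySem.List.pyGetD money i 0) →
      (pvBLoop sa money order ptr out).length = out.length ∧
      (∀ m : Nat, (m : Int) ∉ order → (pvBLoop sa money order ptr out)[m]? = out[m]?) ∧
      (∀ m : Nat, (m : Int) ∈ order →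
        ∃ k : Nat, pvChar sa (PySem.List.pyGetD money (m : Int) 0) k ∧
          (pvBLoop sa money order ptr out)[m]? = some (k : Int)) := by
  intro order
  induction order with
  | nil =>
    intro ptr out _ _ _ _ _
    exact ⟨rfl, fun _ _ => rfl, fun m hm => absurd hm (List.not_mem_nil)⟩
  | cons i rest ih =>
    intro ptr out hlen hple hrange hpw hinv
    have hi0 : 0 ≤ i := (hrange i (List.mem_cons_self)).1
    have hilt : i < (money.length : Int) := (hrange i (List.mem_cons_self)).2
    have hchar : pvChar sa (PySem.List.pyGetD money i 0) (pvAdv sa (PySem.List.pyGetD money i 0) ptr) :=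
      pvAdv_char sa _ hs ptr hple (hinv i (List.mem_cons_self))
    set q := PySem.List.pyGetD money i 0 with hq
    set p := pvAdv sa q ptr with hp
    have hset : PySem.List.pySetD out i (p : Int) = out.set i.toNat (p : Int) :=
      PySem.List.pySetD_of_nonneg out (p : Int) hi0
    have hlen' : (PySem.List.pySetD out i (p : Int)).length = money.length := by
      rw [hset, List.length_set, hlen]
    have hrest := ih p (PySem.List.pySetD out i (p : Int)) hlen' hchar.1
      (fun j hj => hrange j (List.mem_cons_of_mem i hj))
      hpw.tail
      (by
        intro i' hi' j hj hjp
        have h1 : sa[j] ≤ q := hchar.2.1 j hj hjp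
        have h2 : q ≤ PySem.List.pyGetD money i' 0 :=
          (List.pairwise_cons.mp hpw).1 i' hi'
        omega)
    rw [pvBLoop]
    refine ⟨by rw [hrest.1, hlen', hlen], ?_, ?_⟩
    · intro m hm
      have hmne : (m : Int) ≠ i := fun h => hm (h ▸ List.mem_cons_self)
      have hmrest : (m : Int) ∉ rest := fun h => hm (List.mem_cons_of_mem i h)
      rw [hrest.2.1 m hmrest, hset, List.getElem?_set_ne (by omega)]
    · intro m hm
      rcases List.mem_cons.mp hm with hmi | hmr
      · by_cases hmr : (m : Int) ∈ rest
        · exact hrest.2.2 m hmr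
        · refine ⟨p, by rw [← hmi] at hq; exact hq ▸ hchar, ?_⟩
          rw [hrest.2.1 m hmr, hset]
          have hmi' : i.toNat = m := by omega
          rw [← hmi', List.getElem?_set_self (by omega)]
      · exact hrest.2.2 m hmr

-- ===== VERDICT (by name: the statement is the Claim_ definition above) =====
theorem find_purchase_options_spec : Claim_equal_find_purchase_options := by
  intro prices money _hdom
  unfold Spec_find_purchase_options find_purchase_options find_purchase_options_alt
  set sa := PySem.List.sorted prices (fun x => x) false with hsa
  have hs : sa.Pairwise (· ≤ ·) := PySem.List.sorted_pairwise prices (fun x => x)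
  -- A is a map over money
  have hA : money.foldl (fun output i =>
      let insert := binary_search sa i
      if insert = -1 then output ++ [(sa.length : Int)] else output ++ [insert]) [] =
      money.map (fun i => if binary_search sa i = -1 then (sa.length : Int)
        else binary_search sa i) := by
    have : (fun (output : List Int) (i : Int) =>
        let insert := binary_search sa i
        if insert = -1 then output ++ [(sa.length : Int)] else output ++ [insert]) =
        (fun output i => output ++ [if binary_search sa i = -1 then (sa.length : Int)
          else binary_search sa i]) := by
      funext output i
      simp only []
      split <;> rfl
    rw [this, PySem.List.foldl_append_singleton_eq_map, List.nil_append]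
  rw [hA]
  -- B via the loop lemma
  set order := PySem.List.sorted (PySem.List.pyRange 0 (money.length : Int) 1)
      (fun i => PySem.List.pyGetD money i 0) false with horder
  have hmemo : ∀ x : Int, x ∈ order ↔ (0 ≤ x ∧ x < (money.length : Int)) := by
    intro x
    rw [horder, PySem.List.mem_sorted, PySem.List.mem_pyRange_one]
  have hB := pvBLoop_spec sa money hs order 0 (List.replicate money.length 0)
    (List.length_replicate) (Nat.zero_le _)
    (fun i hi => (hmemo i).mp hi)
    (PySem.List.sorted_pairwise _ _)
    (fun i _ j _ h => absurd h (by omega))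
  apply List.ext_getElem?
  intro m
  by_cases hm : m < money.length
  · have hmem : (m : Int) ∈ order := (hmemo (m : Int)).mpr ⟨by omega, by omega⟩
    obtain ⟨k, hk, hkv⟩ := hB.2.2 m hmem
    rw [hkv, List.getElem?_map, List.getElem?_eq_getElem hm]
    have hq : PySem.List.pyGetD money (m : Int) 0 = money[m] := by
      rw [PySem.List.pyGetD_natCast, List.getD_eq_getElem _ _ hm]
    rw [hq] at hk
    have hbs := pvBsLoop_char sa (money[m]) hs 0 ((sa.length : Int) - 1) (-1)
      (le_refl 0) (by omega) (by omega)
      (fun j hj h => absurd h (by omega))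
      (fun j hj h => absurd (Nat.cast_lt.mp (by omega : (j : Int) < (sa.length : Int))) (by omega))
      (Or.inl ⟨rfl, rfl⟩)
    obtain ⟨k', hk', hkv'⟩ := hbs
    have : k = k' := pvChar_unique hk hk'
    subst this
    simp only [Option.map_some, binary_search]
    rw [← hkv']
  · have h1 : (money.map (fun i => if binary_search sa i = -1 then (sa.length : Int)
        else binary_search sa i))[m]? = none := by
      rw [List.getElem?_eq_none]; simpa using (by omega : money.length ≤ m)
    have h2 : (pvBLoop sa money order 0 (List.replicate money.length 0))[m]? = none := by
      rw [List.getElem?_eq_none]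
      rw [hB.1, List.length_replicate]; omega
    rw [h1, h2]
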